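-- pv_equiv track=rewrite | github.com/KashishAggarwal21/Celebal_assigment_Kashish-Aggarwal_week2_Batch-2 | incorrect-regex regex based problem statement.py | has_multiple_repeat
-- ===== SOURCE A (Python) =====
-- QUANTS = set('*+?')
--
-- Q_START = QUANTS.union({'{'})
--
-- def has_multiple_repeat(pat: str) -> bool:
--     escaped = False
--     prev = ''
--     for ch in pat:
--         if escaped:
--             escaped = False
--         elif ch == '\\':
--             escaped = True
--         else:
--             if prev in Q_START and (ch in QUANTS or ch == '{'):
--                 return True
--         prev = ch
--     return False
-- ===== SOURCE B (Python) =====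
-- Q_START = set('*+?{')
--
-- def has_multiple_repeat(pat: str) -> bool:
--     return any(a in Q_START and b in Q_START for a, b in zip(pat, pat[1:]))
-- ===== Notes on version B (the rewrite author's own statement) =====
-- stated objective: simpler
-- what changed: Dropped A's escaped/prev state machine (its escape tracking is dead code, since a quantifier-start char is never a backslash) and replaced the loop with a single any() over adjacent character pairs via zip.
import Mathlib
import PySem

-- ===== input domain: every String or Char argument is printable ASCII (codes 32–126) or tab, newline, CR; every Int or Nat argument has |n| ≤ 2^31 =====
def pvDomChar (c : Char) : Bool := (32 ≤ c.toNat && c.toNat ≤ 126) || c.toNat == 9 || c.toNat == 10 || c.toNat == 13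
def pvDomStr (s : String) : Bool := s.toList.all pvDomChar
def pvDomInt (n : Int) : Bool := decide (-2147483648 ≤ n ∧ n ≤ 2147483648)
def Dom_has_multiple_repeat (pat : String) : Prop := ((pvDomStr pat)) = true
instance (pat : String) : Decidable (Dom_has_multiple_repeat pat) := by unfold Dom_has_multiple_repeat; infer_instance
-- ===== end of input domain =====

-- B drops A's escaped/prev state machine (dead code: a quantifier char is never a backslash)
-- and just tests adjacent character pairs; objective: simpler.

-- ===== PORT A =====
-- QUANTS = set('*+?'); Q_START = QUANTS ∪ {'{'}
def hmrQUANTS : List Char := ['*', '+', '?']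
-- Python's prev is a string ('' initially, then the previous char); membership test kept on strings
def hmrQ_START_S : List String := ["*", "+", "?", "{"]
-- the for-loop of A, step for step (early `return True` = returning true from the recursion)
def hmrLoop (escaped : Bool) (prev : String) : List Char → Bool
  | [] => false
  | ch :: rest =>
    if escaped then hmrLoop false (String.ofList [ch]) rest
    else if ch = '\\' then hmrLoop true (String.ofList [ch]) rest
    else if prev ∈ hmrQ_START_S ∧ (ch ∈ hmrQUANTS ∨ ch = '{') then true
    else hmrLoop escaped (String.ofList [ch]) rest

def has_multiple_repeat (pat : String) : Bool := hmrLoop false "" pat.toList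

-- ===== PORT B =====
def hmrIsQStart (c : Char) : Bool := c == '*' || c == '+' || c == '?' || c == '{'

def has_multiple_repeat_alt (pat : String) : Bool :=
  (pat.toList.zip (pat.toList.drop 1)).any (fun ab => hmrIsQStart ab.1 && hmrIsQStart ab.2)

-- ===== PRECONDITION & SPEC =====
def Spec_has_multiple_repeat (pat : String) (out : Bool) : Prop := out = has_multiple_repeat_alt pat
instance (pat : String) (out : Bool) : Decidable (Spec_has_multiple_repeat pat out) := by unfold Spec_has_multiple_repeat; infer_instance

-- ===== CLAIM (what is proved, stated in full; the proofs are below) =====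
def Claim_equal_has_multiple_repeat : Prop := ∀ (pat : String), Dom_has_multiple_repeat pat → Spec_has_multiple_repeat pat (has_multiple_repeat pat)

-- ===== LEMMAS AND PROOFS =====

-- abstract pair scanner: `prevQ` records whether the previous char is a quantifier-start
def hmrScan (prevQ : Bool) : List Char → Bool
  | [] => false
  | ch :: rest => (prevQ && hmrIsQStart ch) || hmrScan (hmrIsQStart ch) rest

theorem hmr_memS (c : Char) :
    (String.ofList [c] ∈ hmrQ_START_S) ↔ hmrIsQStart c = true := by
  simp [hmrQ_START_S, hmrIsQStart, String.ext_iff]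
  tauto

theorem hmrLoop_eq_scan (l : List Char) (escaped : Bool) (prev : String) (b : Bool)
    (hb : (prev ∈ hmrQ_START_S) ↔ b = true)
    (h : escaped = true → b = false) :
    hmrLoop escaped prev l = hmrScan b l := by
  induction l generalizing escaped prev b with
  | nil => simp [hmrLoop, hmrScan]
  | cons ch rest ih =>
    by_cases he : escaped = true
    · subst he
      simp only [hmrLoop]
      rw [ih false (String.ofList [ch]) (hmrIsQStart ch) (hmr_memS ch) (by simp)]
      simp [hmrScan, h rfl]
    · have he' : escaped = false := by cases escaped <;> simp_all
      subst he'
      by_cases hbk : ch = '\\'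
      · subst hbk
        simp only [hmrLoop, Bool.false_eq_true, if_false]
        rw [ih true (String.ofList ['\\']) false
          (by simp [hmrQ_START_S, String.ext_iff]) (fun _ => rfl)]
        have h2 : hmrIsQStart '\\' = false := by decide
        simp [hmrScan, h2]
      · by_cases hq : prev ∈ hmrQ_START_S ∧ (ch ∈ hmrQUANTS ∨ ch = '{')
        · simp only [hmrLoop, Bool.false_eq_true, if_false, if_neg hbk, if_pos hq]
          have h1 : hmrIsQStart ch = true := by
            rcases hq.2 with h2 | h2
            · fin_cases h2 <;> decide
            · subst h2; decide
          have h3 : b = true := hb.mp hq.1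
          simp [hmrScan, h3, h1]
        · simp only [hmrLoop, Bool.false_eq_true, if_false, if_neg hbk, if_neg hq]
          rw [ih false (String.ofList [ch]) (hmrIsQStart ch) (hmr_memS ch) (by simp)]
          have h4 : (b && hmrIsQStart ch) = false := by
            cases hB : b
            · rfl
            · cases hcq : hmrIsQStart ch
              · rfl
              · exfalso; apply hq
                refine ⟨hb.mpr hB, ?_⟩
                simp [hmrIsQStart] at hcq
                simp [hmrQUANTS]
                tauto
          simp [hmrScan, h4]

theorem hmr_zip_eq_scan (l : List Char) (a : Char) :
    ((a :: l).zip l).any (fun ab => hmrIsQStart ab.1 && hmrIsQStart ab.2)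
      = hmrScan (hmrIsQStart a) l := by
  induction l generalizing a with
  | nil => simp [hmrScan]
  | cons b t ih =>
    simp only [hmrScan, List.zip]
    rw [← ih b]
    simp [List.zip]

-- ===== VERDICT (by name: the statement is the Claim_ definition above) =====
theorem has_multiple_repeat_spec : Claim_equal_has_multiple_repeat := by
  intro pat _
  unfold Spec_has_multiple_repeat has_multiple_repeat has_multiple_repeat_alt
  rw [hmrLoop_eq_scan _ false "" false (by simp [hmrQ_START_S]) (by simp)]
  cases pat.toList with
  | nil => simp [hmrScan]
  | cons a l =>
    simp only [List.drop_one, List.tail_cons]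
    rw [hmr_zip_eq_scan l a]
    simp [hmrScan]
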